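-- pv_equiv track=rewrite | github.com/jpeckenpaugh/jpeckenpaugh.github.io | travel_v01.py | can_place_house_occupant_pose
-- ===== SOURCE A (Python) =====
-- from typing import Dict, List
--
-- def house_row_spans(art_rows: List[str]) -> List[tuple[int, int] | None]:
--     spans: List[tuple[int, int] | None] = []
--     for row in art_rows:
--         line = str(row)
--         filled = [idx for idx, ch in enumerate(line) if ch != " "]
--         spans.append((filled[0], filled[-1]) if filled else None)
--     return spans
--
-- def can_place_house_occupant_pose(art_rows: List[str], occupant_rows: List[List[str]], pose: dict) -> bool:
--     spans = house_row_spans(art_rows)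
--     occ_h = len(occupant_rows)
--     occ_x0 = int(pose.get("x0", 0))
--     occ_y0 = max(0, len(art_rows) - occ_h - int(pose.get("floor_offset", 1)))
--     for local_y, occ_row in enumerate(occupant_rows):
--         house_y = occ_y0 + local_y
--         if house_y < 0 or house_y >= len(spans):
--             return False
--         span = spans[house_y]
--         if span is None:
--             return False
--         min_x, max_x = span
--         for local_x, cell in enumerate(occ_row):
--             if cell == " ":
--                 continue
--             house_x = occ_x0 + local_x
--             if house_x < min_x or house_x > max_x:
--                 return False
--     return True
-- ===== SOURCE B (Python) =====
-- def can_place_house_occupant_pose(art_rows, occupant_rows, pose):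
--     occ_x0 = int(pose.get("x0", 0))
--     occ_y0 = max(0, len(art_rows) - len(occupant_rows) - int(pose.get("floor_offset", 1)))
--     for local_y, occ_row in enumerate(occupant_rows):
--         house_y = occ_y0 + local_y
--         if house_y >= len(art_rows):
--             return False
--         line = str(art_rows[house_y])
--         filled = [i for i, ch in enumerate(line) if ch != " "]
--         if not filled:
--             return False
--         occ = [i for i, c in enumerate(occ_row) if c != " "]
--         if occ and (occ_x0 + occ[0] < filled[0] or occ_x0 + occ[-1] > filled[-1]):
--             return False
--     return True
-- ===== Notes on version B (the rewrite author's own statement) =====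
-- stated objective: faster
-- what changed: B drops the precomputed spans list and the per-cell inner loop: it computes the span only of each house row an occupant row actually lands on (instead of all art rows) and replaces the per-cell containment scan with one interval comparison of the occupant row's first and last filled indices.
import Mathlib
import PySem

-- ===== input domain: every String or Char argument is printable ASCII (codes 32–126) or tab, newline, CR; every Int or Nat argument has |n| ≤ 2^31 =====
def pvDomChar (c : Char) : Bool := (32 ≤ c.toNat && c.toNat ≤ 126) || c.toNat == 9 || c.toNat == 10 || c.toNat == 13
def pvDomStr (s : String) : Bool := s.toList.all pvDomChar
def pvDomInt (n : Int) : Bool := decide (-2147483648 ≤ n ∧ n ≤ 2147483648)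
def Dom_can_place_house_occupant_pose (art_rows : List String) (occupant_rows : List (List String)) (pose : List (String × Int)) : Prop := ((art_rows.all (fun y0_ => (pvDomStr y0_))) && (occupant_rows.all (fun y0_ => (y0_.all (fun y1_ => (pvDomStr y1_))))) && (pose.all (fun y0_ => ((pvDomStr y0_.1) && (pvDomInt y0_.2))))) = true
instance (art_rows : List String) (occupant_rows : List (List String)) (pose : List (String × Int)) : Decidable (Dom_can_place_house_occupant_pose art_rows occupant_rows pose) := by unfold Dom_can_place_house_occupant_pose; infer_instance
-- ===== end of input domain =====

-- B drops the precomputed spans list and the per-cell containment loop: it spans only the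
-- house rows the occupant lands on and does one interval comparison per occupant row
-- (measured faster in a timing run; return value proved equal on all inputs).

-- ===== PORT A =====
-- span of one art row: (first filled index, last filled index) or none
def pvSpanA (row : String) : Option (Int × Int) :=
  let filled := (PySem.List.enumerate row.toList 0).filterMap
      (fun p => if p.2 ≠ ' ' then some p.1 else none)
  if filled = [] then none else some (filled.head!, filled.getLast!)

def house_row_spans (art_rows : List String) : List (Option (Int × Int)) :=
  art_rows.foldl (fun spans row => spans ++ [pvSpanA row]) []

-- inner per-cell loop of A (early return False becomes the false branch)
def pvCellsA (occ_x0 min_x max_x : Int) : List String → Int → Bool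
  | [], _ => true
  | cell :: rest, lx =>
    if cell = " " then pvCellsA occ_x0 min_x max_x rest (lx + 1)
    else if occ_x0 + lx < min_x || max_x < occ_x0 + lx then false
    else pvCellsA occ_x0 min_x max_x rest (lx + 1)

-- outer per-row loop of A
def pvRowsA (spans : List (Option (Int × Int))) (occ_x0 occ_y0 : Int) :
    List (List String) → Int → Bool
  | [], _ => true
  | occ_row :: rest, local_y =>
    let house_y := occ_y0 + local_y
    if house_y < 0 || (spans.length : Int) ≤ house_y then false
    else
      match PySem.List.pyGetD spans house_y none with
      | none => false
      | some (min_x, max_x) =>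
        if pvCellsA occ_x0 min_x max_x occ_row 0 then
          pvRowsA spans occ_x0 occ_y0 rest (local_y + 1)
        else false

def can_place_house_occupant_pose (art_rows : List String) (occupant_rows : List (List String)) (pose : List (String × Int)) : Bool :=
  let spans := house_row_spans art_rows
  let occ_h : Int := occupant_rows.length
  let occ_x0 := PySem.Dict.getD (PySem.Dict.mk pose) "x0" 0
  let occ_y0 := max 0 ((art_rows.length : Int) - occ_h - PySem.Dict.getD (PySem.Dict.mk pose) "floor_offset" 1)
  pvRowsA spans occ_x0 occ_y0 occupant_rows 0

-- ===== PORT B =====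
-- filled indices of a house line / of an occupant row
def pvFilledStr (line : String) : List Int :=
  (PySem.List.enumerate line.toList 0).filterMap
    (fun p => if p.2 ≠ ' ' then some p.1 else none)

def pvFilledRow (row : List String) : List Int :=
  (PySem.List.enumerate row 0).filterMap
    (fun p => if p.2 ≠ " " then some p.1 else none)

def pvRowsB (art_rows : List String) (occ_x0 occ_y0 : Int) :
    List (List String) → Int → Bool
  | [], _ => true
  | occ_row :: rest, local_y =>
    let house_y := occ_y0 + local_y
    if (art_rows.length : Int) ≤ house_y then false
    else
      let line := PySem.List.pyGetD art_rows house_y ""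
      let filled := pvFilledStr line
      if filled = [] then false
      else
        let occf := pvFilledRow occ_row
        if !occf.isEmpty &&
            (occ_x0 + occf.head! < filled.head! || filled.getLast! < occ_x0 + occf.getLast!) then
          false
        else pvRowsB art_rows occ_x0 occ_y0 rest (local_y + 1)

def can_place_house_occupant_pose_alt (art_rows : List String) (occupant_rows : List (List String)) (pose : List (String × Int)) : Bool :=
  let occ_x0 := PySem.Dict.getD (PySem.Dict.mk pose) "x0" 0
  let occ_y0 := max 0 ((art_rows.length : Int) - (occupant_rows.length : Int) - PySem.Dict.getD (PySem.Dict.mk pose) "floor_offset" 1)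
  pvRowsB art_rows occ_x0 occ_y0 occupant_rows 0

-- ===== PRECONDITION & SPEC =====
def Spec_can_place_house_occupant_pose (art_rows : List String) (occupant_rows : List (List String)) (pose : List (String × Int)) (out : Bool) : Prop := out = can_place_house_occupant_pose_alt art_rows occupant_rows pose
instance (art_rows : List String) (occupant_rows : List (List String)) (pose : List (String × Int)) (out : Bool) : Decidable (Spec_can_place_house_occupant_pose art_rows occupant_rows pose out) := by unfold Spec_can_place_house_occupant_pose; infer_instance

-- ===== CLAIM (what is proved, stated in full; the proofs are below) =====
def Claim_equal_can_place_house_occupant_pose : Prop := ∀ (art_rows : List String) (occupant_rows : List (List String)) (pose : List (String × Int)), Dom_can_place_house_occupant_pose art_rows occupant_rows pose → Spec_can_place_house_occupant_pose art_rows occupant_rows pose (can_place_house_occupant_pose art_rows occupant_rows pose)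

-- ===== LEMMAS AND PROOFS =====

theorem house_row_spans_eq_map (art_rows : List String) :
    house_row_spans art_rows = art_rows.map pvSpanA := by
  unfold house_row_spans
  simpa using PySem.List.foldl_append_singleton_eq_map pvSpanA art_rows []

theorem pvSpanA_eq (line : String) :
    pvSpanA line = if pvFilledStr line = [] then none
      else some ((pvFilledStr line).head!, (pvFilledStr line).getLast!) := rfl

-- the A-side inner loop is the "all filled cells in range" predicate
theorem pvCellsA_iff (occ_x0 mn mx : Int) (row : List String) (lx : Int) :
    pvCellsA occ_x0 mn mx row lx = true ↔
      ∀ p ∈ PySem.List.enumerate row lx, p.2 ≠ " " →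
        mn ≤ occ_x0 + p.1 ∧ occ_x0 + p.1 ≤ mx := by
  induction row generalizing lx with
  | nil => simp [pvCellsA, PySem.List.enumerate_nil]
  | cons cell rest ih =>
    rw [PySem.List.enumerate_cons]
    by_cases hc : cell = " "
    · simp [pvCellsA, hc, ih]
    · by_cases hr : occ_x0 + lx < mn || mx < occ_x0 + lx
      · simp only [pvCellsA, if_neg hc, if_pos hr]
        constructor
        · intro h; exact absurd h (by simp)
        · intro h
          rcases h (lx, cell) (by simp) hc with ⟨h1, h2⟩
          simp only [Bool.or_eq_true, decide_eq_true_eq] at hr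
          omega
      · simp only [pvCellsA, if_neg hc, if_neg hr, ih]
        simp only [Bool.or_eq_true, decide_eq_true_eq, not_or, not_lt] at hr
        constructor
        · intro h p hp
          rcases List.mem_cons.mp hp with h1 | h1
          · subst h1; intro _; exact ⟨hr.1, hr.2⟩
          · exact h p h1
        · intro h p hp; exact h p (List.mem_cons.mpr (Or.inr hp))

theorem mem_pvFilledRow_iff (row : List String) (i : Int) :
    i ∈ pvFilledRow row ↔
      ∃ p ∈ PySem.List.enumerate row 0, p.2 ≠ " " ∧ p.1 = i := by
  unfold pvFilledRow
  simp only [List.mem_filterMap]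
  constructor
  · rintro ⟨p, hp, h⟩
    by_cases hc : p.2 = " "
    · simp [hc] at h
    · refine ⟨p, hp, hc, ?_⟩
      simp [hc] at h; exact h
  · rintro ⟨p, hp, hc, hi⟩
    exact ⟨p, hp, by simp [hc, hi]⟩

theorem pvFilledRow_pairwise (row : List String) :
    (pvFilledRow row).Pairwise (· ≤ ·) := by
  unfold pvFilledRow
  refine List.Pairwise.filterMap _ ?_ (PySem.List.pairwise_lt_enumerate row 0)
  intro a b hab c hc d hd
  by_cases ha : a.2 = " " <;> by_cases hb : b.2 = " " <;>
    simp [ha, hb] at hc hd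
  omega

theorem getLast!_cons_cons (a b : Int) (t : List Int) :
    (a :: b :: t).getLast! = (b :: t).getLast! := rfl

theorem head!_le_of_pairwise (l : List Int) (hp : l.Pairwise (· ≤ ·))
    (i : Int) (hi : i ∈ l) : l.head! ≤ i := by
  rcases l with _ | ⟨a, t⟩
  · simp at hi
  · rcases List.mem_cons.mp hi with h | h
    · simp [h]
    · simpa using (List.pairwise_cons.mp hp).1 i h

theorem le_getLast!_of_pairwise (l : List Int) (hp : l.Pairwise (· ≤ ·)) :
    ∀ i ∈ l, i ≤ l.getLast! := by
  induction l with
  | nil => simp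
  | cons a t ih =>
    intro i hi
    rcases List.mem_cons.mp hi with h | h
    · subst h
      rcases t with _ | ⟨b, t'⟩
      · simp
      · rw [getLast!_cons_cons]
        have hab : i ≤ b := by simpa using (List.pairwise_cons.mp hp).1 b (by simp)
        have hb := ih (List.pairwise_cons.mp hp).2 b (by simp)
        omega
    · rcases t with _ | ⟨b, t'⟩
      · simp at h
      · rw [getLast!_cons_cons]
        exact ih (List.pairwise_cons.mp hp).2 i h

theorem sorted_bounds (l : List Int) (hp : l.Pairwise (· ≤ ·)) (_hne : l ≠ [])
    (i : Int) (hi : i ∈ l) : l.head! ≤ i ∧ i ≤ l.getLast! :=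
  ⟨head!_le_of_pairwise l hp i hi, le_getLast!_of_pairwise l hp i hi⟩

theorem head!_mem (l : List Int) (hne : l ≠ []) : l.head! ∈ l := by
  rcases l with _ | ⟨a, t⟩
  · exact absurd rfl hne
  · simp

theorem getLast!_mem (l : List Int) (hne : l ≠ []) : l.getLast! ∈ l := by
  induction l with
  | nil => exact absurd rfl hne
  | cons a t ih =>
    rcases t with _ | ⟨b, t'⟩
    · simp
    · rw [getLast!_cons_cons]
      exact List.mem_cons.mpr (Or.inr (ih (by simp)))

-- A's inner loop equals B's interval test
theorem pvCellsA_eq_interval (occ_x0 mn mx : Int) (row : List String) :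
    pvCellsA occ_x0 mn mx row 0 =
      !(!(pvFilledRow row).isEmpty &&
        (occ_x0 + (pvFilledRow row).head! < mn || mx < occ_x0 + (pvFilledRow row).getLast!)) := by
  by_cases hocc : pvFilledRow row = []
  · have : pvCellsA occ_x0 mn mx row 0 = true := by
      rw [pvCellsA_iff]
      intro p hp hc
      have : p.1 ∈ pvFilledRow row := (mem_pvFilledRow_iff row p.1).mpr ⟨p, hp, hc, rfl⟩
      rw [hocc] at this; simp at this
    simp [this, hocc]
  · obtain ⟨o, os, hl⟩ := List.exists_cons_of_ne_nil hocc
    have hpair := pvFilledRow_pairwise row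
    by_cases hin : mn ≤ occ_x0 + (o :: os).head! ∧ occ_x0 + (o :: os).getLast! ≤ mx
    · have hA : pvCellsA occ_x0 mn mx row 0 = true := by
        rw [pvCellsA_iff]
        intro p hp hc
        have hm : p.1 ∈ pvFilledRow row := (mem_pvFilledRow_iff row p.1).mpr ⟨p, hp, hc, rfl⟩
        have hb := sorted_bounds _ hpair hocc p.1 hm
        rw [hl] at hb
        exact ⟨by omega, by omega⟩
      rw [hA, hl]
      have h1 : mn ≤ occ_x0 + (o :: os).head! := hin.1
      have h2 : occ_x0 + (o :: os).getLast! ≤ mx := hin.2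
      simp at h1 h2 ⊢
      omega
    · have hmem : ∃ i ∈ pvFilledRow row, ¬ (mn ≤ occ_x0 + i ∧ occ_x0 + i ≤ mx) := by
        by_cases h1 : mn ≤ occ_x0 + (o :: os).head!
        · have h2 : ¬ occ_x0 + (o :: os).getLast! ≤ mx := fun h => hin ⟨h1, h⟩
          refine ⟨(o :: os).getLast!, ?_, by omega⟩
          rw [hl]; exact getLast!_mem _ (by simp)
        · refine ⟨(o :: os).head!, ?_, by omega⟩
          rw [hl]; exact head!_mem _ (by simp)
      have hA : pvCellsA occ_x0 mn mx row 0 = false := by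
        rcases hmem with ⟨i, hi, hnot⟩
        rcases (mem_pvFilledRow_iff row i).mp hi with ⟨p, hp, hc, hpi⟩
        by_contra h
        have := (pvCellsA_iff occ_x0 mn mx row 0).mp (by simpa using h) p hp hc
        rw [hpi] at this; exact hnot this
      rw [hA, hl]
      have : occ_x0 + (o :: os).head! < mn ∨ mx < occ_x0 + (o :: os).getLast! := by omega
      rcases this with h | h <;> (simp at h ⊢; omega)

theorem bool_not_lt (a b : Int) : (!decide (a < b)) = decide (b ≤ a) := by
  by_cases h : a < b
  · simp [h, not_le.mpr h]
  · simp [h, not_lt.mp h]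

-- the two row loops agree for nonnegative occ_y0 and local index
theorem rows_eq (art_rows : List String) (occ_x0 occ_y0 : Int)
    (h0 : 0 ≤ occ_y0) :
    ∀ (rows : List (List String)) (ly : Int), 0 ≤ ly →
      pvRowsA (art_rows.map pvSpanA) occ_x0 occ_y0 rows ly =
        pvRowsB art_rows occ_x0 occ_y0 rows ly := by
  intro rows
  induction rows with
  | nil => intro ly _; rfl
  | cons row rest ih =>
    intro ly hly
    unfold pvRowsA pvRowsB
    simp only [List.length_map]
    by_cases hlen : (art_rows.length : Int) ≤ occ_y0 + ly
    · have hA0 : (decide (occ_y0 + ly < 0) || decide ((art_rows.length : Int) ≤ occ_y0 + ly)) = true := by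
        simp [hlen]
      rw [hA0, if_pos rfl, if_pos hlen]
    · have hA0 : (decide (occ_y0 + ly < 0) || decide ((art_rows.length : Int) ≤ occ_y0 + ly)) = false := by
        simp; omega
      rw [hA0, if_neg (by simp), if_neg hlen]
      have h1 : (0 : Int) ≤ occ_y0 + ly := by omega
      have h2 : occ_y0 + ly < (art_rows.length : Int) := by omega
      rw [PySem.List.pyGetD_eq_getElem _ _ h1 (by simpa using h2),
        PySem.List.pyGetD_eq_getElem _ _ h1 h2]
      simp only [List.getElem_map]
      rw [pvSpanA_eq]
      by_cases hf : pvFilledStr (art_rows[(occ_y0 + ly).toNat]'(by omega)) = []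
      · simp [hf]
      · rw [if_neg hf, if_neg hf]
        simp only []
        rw [pvCellsA_eq_interval]
        have hrec := ih (ly + 1) (by omega)
        simp [hrec, bool_not_lt]

-- ===== VERDICT (by name: the statement is the Claim_ definition above) =====
theorem can_place_house_occupant_pose_spec : Claim_equal_can_place_house_occupant_pose := by
  intro art_rows occupant_rows pose _
  unfold Spec_can_place_house_occupant_pose
  unfold can_place_house_occupant_pose can_place_house_occupant_pose_alt
  rw [house_row_spans_eq_map]
  exact rows_eq art_rows _ _ (le_max_left _ _) occupant_rows 0 le_rfl
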